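-- pv_equiv track=rewrite | github.com/pypi-data/pypi-mirror-332 | packages/shankskit/shankskit-0.1.0.tar.gz/shankskit-0.1.0/shankskit/shankskit.py | spacestringrecursion
-- ===== SOURCE A (Python) =====
-- def spacestringrecursion(input_string, output, current_depth, max_depth, filler_chr):
--     if current_depth < max_depth:
--         for i in range(0,len(input_string)+1):
--             spaced_instance = input_string[0:i] + filler_chr + input_string[i:]
--             if spaced_instance not in output.keys():
--                 spacestringrecursion(spaced_instance, output, current_depth+1, max_depth, filler_chr)
--     else:
--         output[input_string] = ""
--     return output
-- ===== SOURCE B (Python) =====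
-- def spacestringrecursion(input_string, output, current_depth, max_depth, filler_chr):
--     # Iterative depth-first traversal with an explicit stack instead of recursion;
--     # mutates `output` in place like the original.
--     if current_depth >= max_depth:
--         output[input_string] = ""
--         return output
--     stack = [(input_string[:i] + filler_chr + input_string[i:], current_depth + 1)
--              for i in range(len(input_string), -1, -1)]
--     while stack:
--         s, d = stack.pop()
--         if s in output:
--             continue
--         if d >= max_depth:
--             output[s] = ""
--         else:
--             for i in range(len(s), -1, -1):
--                 stack.append((s[:i] + filler_chr + s[i:], d + 1))
--     return output
-- ===== Notes on version B (the rewrite author's own statement) =====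
-- stated objective: alternative
-- what changed: Replaced the self-recursive depth-first insertion by an iterative loop over an explicit worklist stack of (string, depth) pairs, with the already-a-key check moved to pop time.
-- outside the precondition, e.g. on spacestringrecursion('a', {}, 0, 992, ''): A returns {'a': ''}, B returns {'a': ''}
import Mathlib
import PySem

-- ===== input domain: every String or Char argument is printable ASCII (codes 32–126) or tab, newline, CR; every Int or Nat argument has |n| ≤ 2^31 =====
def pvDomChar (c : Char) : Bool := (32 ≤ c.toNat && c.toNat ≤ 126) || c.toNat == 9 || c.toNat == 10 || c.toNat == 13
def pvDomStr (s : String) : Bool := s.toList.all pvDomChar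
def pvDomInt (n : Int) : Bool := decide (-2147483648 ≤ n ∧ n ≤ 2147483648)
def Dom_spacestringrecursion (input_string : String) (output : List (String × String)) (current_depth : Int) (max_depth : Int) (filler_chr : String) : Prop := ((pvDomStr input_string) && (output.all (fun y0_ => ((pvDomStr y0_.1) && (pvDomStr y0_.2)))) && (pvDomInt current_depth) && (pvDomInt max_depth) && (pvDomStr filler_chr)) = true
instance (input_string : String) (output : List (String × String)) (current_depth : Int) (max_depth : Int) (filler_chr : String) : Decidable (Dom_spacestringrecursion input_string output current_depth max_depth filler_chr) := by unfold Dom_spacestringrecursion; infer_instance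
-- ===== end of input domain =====

-- B replaces A's self-recursion by an iterative explicit-stack worklist loop (same results; both
-- Pythons mutate the dict `output` in place the same way; the claim is about the returned dict).

-- ===== PORT A =====
-- `spaceAt s f i` = Python's  s[0:i] + f + s[i:]  — the expression both Pythons contain;
-- exact: PySem slices on the code-point list, then String.ofList of the concatenation.
def spaceAt (s f : String) (i : Int) : String :=
  String.ofList (PySem.List.slice s.toList (some 0) (some i) ++ f.toList ++
    PySem.List.slice s.toList (some i) none)

-- length fact cited by the ports' termination measures
theorem spaceAt_length (s f : String) (i : Int) (h0 : 0 ≤ i) :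
    (spaceAt s f i).toList.length = s.toList.length + f.toList.length := by
  unfold spaceAt
  rw [String.toList_ofList, PySem.List.slice_zero_start, PySem.List.slice_to _ h0,
    PySem.List.slice_from _ h0]
  simp
  omega

mutual
-- literal transliteration of A: the recursion, with A's for-loop as recursion on the index list
def spacestringrecursionRec (max_depth : Int) (filler_chr : String) (current_depth : Int)
    (input_string : String) (output : PySem.Dict String String) : PySem.Dict String String :=
  if _h : current_depth < max_depth then
    spacestringrecursionLoop max_depth filler_chr (current_depth + 1) input_string
      (PySem.List.pyRange 0 ((input_string.toList.length : Int) + 1) 1) output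
  else
    output.insert input_string ""
termination_by ((max_depth - current_depth).toNat, 0)
decreasing_by exact Prod.Lex.left _ _ (by omega)

def spacestringrecursionLoop (max_depth : Int) (filler_chr : String) (cd : Int)
    (input_string : String) (is : List Int) (output : PySem.Dict String String) :
    PySem.Dict String String :=
  match is with
  | [] => output
  | i :: rest =>
    let spaced := spaceAt input_string filler_chr i
    spacestringrecursionLoop max_depth filler_chr cd input_string rest
      (if output.contains spaced then output
       else spacestringrecursionRec max_depth filler_chr cd spaced output)
termination_by ((max_depth - cd).toNat, is.length + 1)
decreasing_by
  · exact Prod.Lex.right _ (by simp only [List.length_cons]; omega)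
  · exact Prod.Lex.right _ (by simp only [List.length_cons]; omega)
end

def spacestringrecursion (input_string : String) (output : List (String × String)) (current_depth : Int) (max_depth : Int) (filler_chr : String) : List (String × String) :=
  (spacestringrecursionRec max_depth filler_chr current_depth input_string
    (PySem.Dict.mk output)).items

-- ===== PORT B =====
-- termination measure for B's worklist loop: size of the full insertion tree below a stack entry
def pvNodes (F : Nat) : Nat → Nat → Nat
  | 0, _ => 1
  | k+1, l => 1 + (l+1) * pvNodes F k (l+F)

theorem pvNodes_pos (F k l : Nat) : 0 < pvNodes F k l := by
  cases k <;> simp [pvNodes]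

def pvStackMeasure (md : Int) (F : Nat) (st : List (String × Int)) : Nat :=
  (st.map (fun e => pvNodes F (md - e.2).toNat e.1.toList.length)).sum

-- the expand step strictly shrinks the measure (cited by the loop's decreasing_by)
theorem pvStackMeasure_expand (md : Int) (f : String) (s : String) (d : Int)
    (rest : List (String × Int)) (h : d < md) :
    pvStackMeasure md f.toList.length
      ((PySem.List.pyRange 0 ((s.toList.length : Int) + 1) 1).map
        (fun i => (spaceAt s f i, d + 1)) ++ rest)
      < pvStackMeasure md f.toList.length ((s, d) :: rest) := by
  unfold pvStackMeasure
  rw [List.map_append, List.sum_append, List.map_cons, List.sum_cons, List.map_map]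
  have hlen : ∀ i ∈ PySem.List.pyRange 0 ((s.toList.length : Int) + 1) 1,
      ((fun e : String × Int => pvNodes f.toList.length (md - e.2).toNat e.1.toList.length) ∘
        (fun i => (spaceAt s f i, d + 1))) i
      = pvNodes f.toList.length (md - (d+1)).toNat (s.toList.length + f.toList.length) := by
    intro i hi
    rw [PySem.List.mem_pyRange_one] at hi
    simp only [Function.comp_apply]
    rw [spaceAt_length s f i hi.1]
  rw [List.map_congr_left hlen, List.map_const', List.sum_replicate, smul_eq_mul,
    PySem.List.length_pyRange_one]
  have hn : ((s.toList.length : Int) + 1 - 0).toNat = s.toList.length + 1 := by omega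
  have hk : (md - d).toNat = (md - (d+1)).toNat + 1 := by omega
  rw [hn, hk]
  simp only [pvNodes]
  omega

-- B's worklist loop; the Lean stack list keeps the TOP at its HEAD (the reverse of the Python
-- list, whose top is its end), so Python's descending pushes are this ascending mapped range
def spacestringrecursionStack (max_depth : Int) (filler_chr : String)
    (stack : List (String × Int)) (output : PySem.Dict String String) : PySem.Dict String String :=
  match stack with
  | [] => output
  | (s, d) :: rest =>
    if output.contains s then
      spacestringrecursionStack max_depth filler_chr rest output
    else if max_depth ≤ d then
      spacestringrecursionStack max_depth filler_chr rest (output.insert s "")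
    else
      spacestringrecursionStack max_depth filler_chr
        ((PySem.List.pyRange 0 ((s.toList.length : Int) + 1) 1).map
          (fun i => (spaceAt s filler_chr i, d + 1)) ++ rest)
        output
termination_by pvStackMeasure max_depth filler_chr.toList.length stack
decreasing_by
  · unfold pvStackMeasure
    rw [List.map_cons, List.sum_cons]
    exact Nat.lt_add_of_pos_left (pvNodes_pos _ _ _)
  · unfold pvStackMeasure
    rw [List.map_cons, List.sum_cons]
    exact Nat.lt_add_of_pos_left (pvNodes_pos _ _ _)
  · exact pvStackMeasure_expand max_depth filler_chr s d rest (by omega)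

def spacestringrecursion_alt (input_string : String) (output : List (String × String)) (current_depth : Int) (max_depth : Int) (filler_chr : String) : List (String × String) :=
  if max_depth ≤ current_depth then
    ((PySem.Dict.mk output).insert input_string "").items
  else
    (spacestringrecursionStack max_depth filler_chr
      ((PySem.List.pyRange 0 ((input_string.toList.length : Int) + 1) 1).map
        (fun i => (spaceAt input_string filler_chr i, current_depth + 1)))
      (PySem.Dict.mk output)).items

-- ===== PRECONDITION & SPEC =====
-- Pre_ excludes inputs whose remaining depth max_depth - current_depth reaches CPython's
-- recursion-limit stack budget: A opens one stack frame per depth level and the default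
-- recursion limit is 1000, so A raises RecursionError there. The exact crash point depends
-- on the handful of frames already in use at the call, so the bound 990 leaves a small
-- margin in which A may still return — see the cite in claim.json.
def Pre_spacestringrecursion (input_string : String) (output : List (String × String)) (current_depth : Int) (max_depth : Int) (filler_chr : String) : Prop := max_depth - current_depth < 990
instance (input_string : String) (output : List (String × String)) (current_depth : Int) (max_depth : Int) (filler_chr : String) : Decidable (Pre_spacestringrecursion input_string output current_depth max_depth filler_chr) := by unfold Pre_spacestringrecursion; infer_instance
def pvWitness_spacestringrecursion : String × (List (String × String)) × Int × Int × String := ("ab", [("x", "y")], 0, 2, " ")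

def Spec_spacestringrecursion (input_string : String) (output : List (String × String)) (current_depth : Int) (max_depth : Int) (filler_chr : String) (out : List (String × String)) : Prop := out = spacestringrecursion_alt input_string output current_depth max_depth filler_chr
instance (input_string : String) (output : List (String × String)) (current_depth : Int) (max_depth : Int) (filler_chr : String) (out : List (String × String)) : Decidable (Spec_spacestringrecursion input_string output current_depth max_depth filler_chr out) := by unfold Spec_spacestringrecursion; infer_instance

-- ===== CLAIM (what is proved, stated in full; the proofs are below) =====
def Claim_equal_spacestringrecursion : Prop := ∀ (input_string : String) (output : List (String × String)) (current_depth : Int) (max_depth : Int) (filler_chr : String), Dom_spacestringrecursion input_string output current_depth max_depth filler_chr → Pre_spacestringrecursion input_string output current_depth max_depth filler_chr → Spec_spacestringrecursion input_string output current_depth max_depth filler_chr (spacestringrecursion input_string output current_depth max_depth filler_chr)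

-- ===== LEMMAS AND PROOFS =====
-- main invariant: running B's stack loop on the mapped children of s (at child depth d) in front
-- of any rest equals first folding A's per-child loop into the dict, then the loop on rest
theorem stack_eq_loop (md : Int) (f : String) :
    ∀ (k : Nat) (d : Int), (md - d).toNat ≤ k →
    ∀ (s : String) (is : List Int) (rest : List (String × Int)) (out : PySem.Dict String String),
    spacestringrecursionStack md f ((is.map (fun i => (spaceAt s f i, d))) ++ rest) out
      = spacestringrecursionStack md f rest (spacestringrecursionLoop md f d s is out) := by
  intro k
  induction k with
  | zero =>
    intro d hd s is rest out
    induction is generalizing out with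
    | nil => simp [spacestringrecursionLoop]
    | cons i tl ih =>
      rw [List.map_cons, List.cons_append, spacestringrecursionStack, spacestringrecursionLoop]
      by_cases hc : out.contains (spaceAt s f i)
      · simp only [hc, if_true, ih]
      · simp only [hc, if_false, Bool.false_eq_true]
        rw [if_pos (by omega), spacestringrecursionRec, dif_neg (by omega), ih]
  | succ k ihk =>
    intro d hd s is rest out
    induction is generalizing out with
    | nil => simp [spacestringrecursionLoop]
    | cons i tl ih =>
      rw [List.map_cons, List.cons_append, spacestringrecursionStack, spacestringrecursionLoop]
      by_cases hc : out.contains (spaceAt s f i)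
      · simp only [hc, if_true, ih]
      · simp only [hc, if_false, Bool.false_eq_true]
        by_cases hmd : md ≤ d
        · rw [if_pos hmd, spacestringrecursionRec, dif_neg (by omega), ih]
        · rw [if_neg hmd, spacestringrecursionRec, dif_pos (by omega),
            ihk (d+1) (by omega), ih]

-- ===== VERDICT (by name: the statement is the Claim_ definition above) =====
theorem spacestringrecursion_spec : Claim_equal_spacestringrecursion := by
  intro input_string output current_depth max_depth filler_chr _ _
  unfold Spec_spacestringrecursion spacestringrecursion spacestringrecursion_alt
  rw [spacestringrecursionRec]
  by_cases h : current_depth < max_depth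
  · rw [dif_pos h, if_neg (by omega)]
    have hmain := stack_eq_loop max_depth filler_chr (max_depth - (current_depth+1)).toNat
      (current_depth+1) (le_refl _) input_string
      (PySem.List.pyRange 0 ((input_string.toList.length : Int) + 1) 1) [] (PySem.Dict.mk output)
    rw [List.append_nil] at hmain
    rw [hmain, spacestringrecursionStack]
  · rw [dif_neg h, if_pos (by omega)]
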